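-- pv_equiv track=rewrite | github.com/thanhlamng/ds2026 | labwork4/wordcount.py | divide_input
-- ===== SOURCE A (Python) =====
-- import string
--
-- def divide_input(text, num_parts):
--     text = text.lower()
--     translator = str.maketrans('', '', string.punctuation)
--     clean_text = text.translate(translator)
--
--     words = clean_text.split()
--     total_words = len(words)
--
--     base_size = total_words // num_parts
--     remainder = total_words % num_parts
--
--     chunks = []
--     start = 0
--     for i in range(num_parts):
--         chunk_size = base_size + (1 if i < remainder else 0)
--         chunk = words[start : start + chunk_size]
--         chunks.append(chunk)
--         start += chunk_size
--     return chunks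
-- ===== SOURCE B (Python) =====
-- import string
--
-- def divide_input(text, num_parts):
--     words = text.lower().translate(str.maketrans('', '', string.punctuation)).split()
--     # Greedy fair split from the END: while k parts remain, the last of them
--     # takes len(words)//k words off the tail; build the result back-to-front.
--     chunks = []
--     for k in range(num_parts, 0, -1):
--         size = len(words) // k
--         chunks.append(words[len(words) - size:])
--         words = words[:len(words) - size]
--     chunks.reverse()
--     return chunks
-- ===== Notes on version B (the rewrite author's own statement) =====
-- stated objective: alternative
-- what changed: Replaced A's precomputed divmod(total, num_parts) plus forward loop with running start and remainder counter by a greedy backward peel: iterate k = num_parts..1, each step slicing len(words)//k words off the tail of the remaining word list, building the chunk list back-to-front and reversing at the end.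
import Mathlib
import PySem

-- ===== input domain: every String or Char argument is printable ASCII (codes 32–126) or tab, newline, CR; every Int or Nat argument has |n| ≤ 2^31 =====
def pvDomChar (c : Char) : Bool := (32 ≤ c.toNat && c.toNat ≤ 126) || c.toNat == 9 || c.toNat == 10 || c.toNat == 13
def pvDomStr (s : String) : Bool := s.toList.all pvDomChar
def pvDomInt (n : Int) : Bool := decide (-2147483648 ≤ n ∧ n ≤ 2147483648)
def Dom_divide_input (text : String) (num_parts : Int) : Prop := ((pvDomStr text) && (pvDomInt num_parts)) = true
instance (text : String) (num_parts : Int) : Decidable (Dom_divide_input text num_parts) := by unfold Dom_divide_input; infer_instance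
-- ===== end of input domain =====

-- B replaces A's forward loop (precomputed divmod of the total, running start, remainder counter)
-- by a greedy backward peel: for k = num_parts..1 take len(words)//k words off the tail,
-- building the chunk list back-to-front (objective: alternative).

-- string.punctuation (shared text-cleaning constant, used verbatim by both ports)
def pvPunct : List Char := "!\"#$%&'()*+,-./:;<=>?@[\\]^_`{|}~".toList

-- hand port of s.translate(str.maketrans('', '', string.punctuation)): deletes exactly those
-- chars, keeps all others; exact for this delete-only ASCII table
def pvClean (s : String) : String := String.ofList (s.toList.filter (fun c => !(pvPunct.contains c)))

-- ===== PORT A =====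
def divide_input (text : String) (num_parts : Int) : List (List String) :=
  let lowered := PySem.Str.lower text
  let clean_text := pvClean lowered
  let words := PySem.Str.split₀ clean_text
  let total_words : Int := (words.length : Int)
  let base_size := PySem.Int.floordiv total_words num_parts
  let remainder := PySem.Int.mod total_words num_parts
  let st := (PySem.List.pyRange 0 num_parts 1).foldl
    (fun (st : List (List String) × Int) i =>
      let chunk_size := base_size + (if i < remainder then 1 else 0)
      let chunk := PySem.List.slice words (some st.2) (some (st.2 + chunk_size))
      (st.1 ++ [chunk], st.2 + chunk_size))
    ([], 0)
  st.1

-- ===== PORT B =====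
def divide_input_alt (text : String) (num_parts : Int) : List (List String) :=
  let words := PySem.Str.split₀ (pvClean (PySem.Str.lower text))
  let st := (PySem.List.pyRange num_parts 0 (-1)).foldl
    (fun (st : List (List String) × List String) k =>
      let ws := st.2
      let size := PySem.Int.floordiv ((ws.length : Int)) k
      (st.1 ++ [PySem.List.slice ws (some ((ws.length : Int) - size)) none],
       PySem.List.slice ws none (some ((ws.length : Int) - size))))
    ([], words)
  st.1.reverse

-- ===== PRECONDITION & SPEC =====
-- Pre_ excludes only num_parts = 0, where A raises ZeroDivisionError.
def Pre_divide_input (text : String) (num_parts : Int) : Prop := num_parts ≠ 0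
instance (text : String) (num_parts : Int) : Decidable (Pre_divide_input text num_parts) := by unfold Pre_divide_input; infer_instance
def pvWitness_divide_input : String × Int := ("Hello, world! one two three", 2)

def Spec_divide_input (text : String) (num_parts : Int) (out : List (List String)) : Prop := out = divide_input_alt text num_parts
instance (text : String) (num_parts : Int) (out : List (List String)) : Decidable (Spec_divide_input text num_parts out) := by unfold Spec_divide_input; infer_instance

-- ===== CLAIM (what is proved, stated in full; the proofs are below) =====
def Claim_equal_divide_input : Prop := ∀ (text : String) (num_parts : Int), Dom_divide_input text num_parts → Pre_divide_input text num_parts → Spec_divide_input text num_parts (divide_input text num_parts)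

-- ===== LEMMAS AND PROOFS =====

-- chunk boundary i of the fair split of n = q*p + r words into p parts (ghost quantity of the proofs)
def pvBnd (q r i : Int) : Int := i * q + min i r

-- B's per-step size len//k equals the width of the k-th boundary interval
theorem pv_size (q r k : Int) (hr : 0 ≤ r) (hk : 0 < k) :
    PySem.Int.floordiv (pvBnd q r k) k = pvBnd q r k - pvBnd q r (k - 1) := by
  rcases le_or_gt k r with h | h
  · have hval : pvBnd q r k = k * q + k := by unfold pvBnd; omega
    have hd : pvBnd q r k - pvBnd q r (k - 1) = q + 1 := by
      unfold pvBnd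
      have h1 : (k - 1) * q = k * q - q := by ring
      omega
    rw [hd, hval, PySem.Int.floordiv_eq_iff_of_pos hk]
    have h1 : (q + 1) * k = k * q + k := by ring
    have h2 : (q + 1 + 1) * k = k * q + k + k := by ring
    constructor <;> omega
  · have hval : pvBnd q r k = k * q + r := by unfold pvBnd; omega
    have hd : pvBnd q r k - pvBnd q r (k - 1) = q := by
      unfold pvBnd
      have h1 : (k - 1) * q = k * q - q := by ring
      omega
    rw [hd, hval, PySem.Int.floordiv_eq_iff_of_pos hk]
    have h1 : q * k = k * q := by ring
    have h2 : (q + 1) * k = k * q + k := by ring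
    constructor <;> omega

-- invariant of A's loop: after the prefix [a, a+k) the running start is pvBnd q r a and the
-- accumulated chunks are the boundary slices for that prefix
theorem pv_fold_inv (words : List String) (q r : Int)
    (k : Nat) : ∀ (a : Int) (cs : List (List String)),
    (PySem.List.pyRange a (a + (k : Int)) 1).foldl
      (fun (st : List (List String) × Int) i =>
        let sz := q + (if i < r then 1 else 0)
        (st.1 ++ [PySem.List.slice words (some st.2) (some (st.2 + sz))], st.2 + sz))
      (cs, pvBnd q r a)
    = (cs ++ (PySem.List.pyRange a (a + (k : Int)) 1).map (fun i =>
        PySem.List.slice words (some (pvBnd q r i)) (some (pvBnd q r (i + 1)))),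
       pvBnd q r (a + (k : Int))) := by
  induction k with
  | zero => intro a cs; simp
  | succ m ih =>
    intro a cs
    have hab : a < a + ((m + 1 : Nat) : Int) := by push_cast; omega
    have hstep : pvBnd q r a + (q + (if a < r then 1 else 0)) = pvBnd q r (a + 1) := by
      unfold pvBnd
      have h1 : (a + 1) * q = a * q + q := by ring
      split_ifs with h <;> omega
    have hshift : a + ((m + 1 : Nat) : Int) = (a + 1) + ((m : Nat) : Int) := by push_cast; ring
    rw [PySem.List.pyRange_one_cons hab, List.foldl_cons, List.map_cons]
    simp only []
    rw [hstep, hshift, ih (a + 1) (cs ++ [PySem.List.slice words (some (pvBnd q r a)) (some (pvBnd q r (a + 1)))])]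
    simp [← hshift]

-- invariant of B's loop: with k parts left and the words up to boundary k remaining, peeling
-- produces exactly the boundary slices for indices k-1 … 0, appended in that (reversed) order
theorem pv_peel_inv (words : List String) (q r : Int) (hq : 0 ≤ q) (hr : 0 ≤ r)
    (k : Nat) : ∀ (cs : List (List String)),
    pvBnd q r (k : Int) ≤ (words.length : Int) →
    (PySem.List.pyRange (k : Int) 0 (-1)).foldl
      (fun (st : List (List String) × List String) j =>
        (st.1 ++ [PySem.List.slice st.2
            (some ((st.2.length : Int) - PySem.Int.floordiv ((st.2.length : Int)) j)) none],
         PySem.List.slice st.2 none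
            (some ((st.2.length : Int) - PySem.Int.floordiv ((st.2.length : Int)) j))))
      (cs, words.take (pvBnd q r (k : Int)).toNat)
    = (cs ++ ((PySem.List.pyRange 0 (k : Int) 1).map (fun i =>
        PySem.List.slice words (some (pvBnd q r i)) (some (pvBnd q r (i + 1))))).reverse,
       []) := by
  induction k with
  | zero =>
    intro cs _
    have h0 : pvBnd q r 0 = 0 := by unfold pvBnd; omega
    simp [PySem.List.pyRange_neg_one_eq_nil le_rfl, h0, PySem.List.pyRange_one_eq_nil le_rfl]
  | succ m ih =>
    intro cs hkn
    have hmk : (0 : Int) < ((m + 1 : Nat) : Int) := by push_cast; omega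
    have hb0 : (0 : Int) ≤ pvBnd q r ((m : Nat) : Int) := by
      unfold pvBnd; have : (0:Int) ≤ (m:Int) := by positivity
      have h1 : (0:Int) ≤ (m:Int) * q := by positivity
      omega
    have hmono : pvBnd q r ((m : Nat) : Int) ≤ pvBnd q r ((m + 1 : Nat) : Int) := by
      unfold pvBnd
      have h1 : ((m + 1 : Nat) : Int) * q = ((m : Nat) : Int) * q + q := by push_cast; ring
      have h2 : ((m + 1 : Nat) : Int) = ((m : Nat) : Int) + 1 := by push_cast; ring
      rw [h1, h2]; omega
    have hbk0 : (0 : Int) ≤ pvBnd q r ((m + 1 : Nat) : Int) := le_trans hb0 hmono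
    have hlen : ((words.take (pvBnd q r ((m + 1 : Nat) : Int)).toNat).length : Int)
        = pvBnd q r ((m + 1 : Nat) : Int) := by
      rw [List.length_take]; omega
    have hsz := pv_size q r ((m + 1 : Nat) : Int) hr hmk
    have hm1 : ((m + 1 : Nat) : Int) - 1 = ((m : Nat) : Int) := by push_cast; ring
    rw [hm1] at hsz
    rw [PySem.List.pyRange_neg_one_cons hmk, List.foldl_cons]
    simp only []
    rw [hlen, hsz]
    have hstart : pvBnd q r ((m + 1 : Nat) : Int)
        - (pvBnd q r ((m + 1 : Nat) : Int) - pvBnd q r ((m : Nat) : Int))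
        = pvBnd q r ((m : Nat) : Int) := by ring
    rw [hstart]
    -- the appended chunk is the boundary slice for index m
    have hchunk :
        PySem.List.slice (words.take (pvBnd q r ((m + 1 : Nat) : Int)).toNat)
          (some (pvBnd q r ((m : Nat) : Int))) none
        = PySem.List.slice words (some (pvBnd q r ((m : Nat) : Int)))
            (some (pvBnd q r (((m : Nat) : Int) + 1))) := by
      have h2 : (((m : Nat) : Int) + 1) = ((m + 1 : Nat) : Int) := by push_cast; ring
      rw [h2, PySem.List.slice_from _ hb0, PySem.List.slice_toNat _ hb0 hbk0,
        List.drop_take]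
    -- the remaining words are the prefix up to boundary m
    have hrest :
        PySem.List.slice (words.take (pvBnd q r ((m + 1 : Nat) : Int)).toNat) none
          (some (pvBnd q r ((m : Nat) : Int)))
        = words.take (pvBnd q r ((m : Nat) : Int)).toNat := by
      rw [PySem.List.slice_to _ hb0, List.take_take]
      congr 1; omega
    rw [hm1, hchunk, hrest, ih (cs ++ [_]) (le_trans hmono hkn)]
    have hsucc : PySem.List.pyRange 0 ((m + 1 : Nat) : Int) 1
        = PySem.List.pyRange 0 ((m : Nat) : Int) 1 ++ [((m : Nat) : Int)] := by
      have h2 : ((m + 1 : Nat) : Int) = ((m : Nat) : Int) + 1 := by push_cast; ring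
      rw [h2, PySem.List.pyRange_one_succ_right (by positivity)]
    rw [hsucc]
    simp

-- ===== VERDICT (by name: the statement is the Claim_ definition above) =====
theorem divide_input_spec : Claim_equal_divide_input := by
  intro text num_parts _ hpre
  unfold Pre_divide_input at hpre
  unfold Spec_divide_input divide_input divide_input_alt
  simp only []
  set words := PySem.Str.split₀ (pvClean (PySem.Str.lower text)) with hw
  set n : Int := ((words.length : Nat) : Int) with hn
  set q := PySem.Int.floordiv n num_parts with hq
  set r := PySem.Int.mod n num_parts with hrdef
  by_cases hpos : 0 < num_parts
  · have hq0 : 0 ≤ q := by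
      rw [hq, PySem.Int.floordiv_eq_ediv_of_pos hpos]
      have hn0 : (0 : Int) ≤ n := by rw [hn]; exact Int.natCast_nonneg _
      exact Int.ediv_nonneg hn0 (by omega)
    have hr0 : 0 ≤ r := by
      rw [hrdef, PySem.Int.mod_eq_emod_of_pos hpos]
      exact Int.emod_nonneg n (by omega)
    have hrlt : r < num_parts := PySem.Int.mod_lt n hpos
    have hbp : pvBnd q r num_parts = n := by
      unfold pvBnd
      have h1 : q * num_parts + r = n := PySem.Int.floordiv_mul_add_mod n num_parts
      have h2 : num_parts * q = q * num_parts := by ring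
      omega
    -- A's loop = boundary-slice map (pv_fold_inv with a = 0)
    have h0 : pvBnd q r 0 = 0 := by unfold pvBnd; omega
    have hk : (0 : Int) + ((num_parts.toNat : Nat) : Int) = num_parts := by omega
    have hinvA := pv_fold_inv words q r num_parts.toNat 0 []
    rw [h0, hk] at hinvA
    -- B's loop = reversed boundary-slice map (pv_peel_inv with k = num_parts)
    have hcast : ((num_parts.toNat : Nat) : Int) = num_parts := by omega
    have hinvB := pv_peel_inv words q r hq0 hr0 num_parts.toNat []
    rw [hcast, hbp] at hinvB
    have htake : words.take n.toNat = words := by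
      rw [hn, Int.toNat_natCast, List.take_length]
    rw [htake] at hinvB
    rw [hinvA, hinvB (le_of_eq hn)]
    simp
  · have hneg : num_parts < 0 := by omega
    have heA : PySem.List.pyRange 0 num_parts 1 = [] :=
      PySem.List.pyRange_one_eq_nil (by omega)
    have heB : PySem.List.pyRange num_parts 0 (-1) = [] :=
      PySem.List.pyRange_neg_one_eq_nil (by omega)
    rw [heA, heB]
    simp
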